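-- pv_equiv track=rewrite | github.com/wisent-ai/wisent-guard | wisent_guard/core/agent/diagnose/tasks/task_selector.py | _are_semantically_similar
-- ===== SOURCE A (Python) =====
-- def _are_semantically_similar(term1: str, term2: str) -> bool:
--     """Check if two terms are semantically similar."""
--     # Direct match
--     if term1 == term2:
--         return True
--
--     # Substring matching
--     if term1 in term2 or term2 in term1:
--         return True
--
--     # Semantic similarity patterns
--     similarity_groups = [
--         {'truth', 'truthful', 'honest', 'accurate', 'fact', 'factual'},
--         {'harm', 'harmful', 'toxic', 'dangerous', 'unsafe', 'risk'},
--         {'quality', 'good', 'excellent', 'superior', 'standard'},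
--         {'bias', 'biased', 'unfair', 'prejudice', 'discrimination'},
--         {'logic', 'logical', 'reasoning', 'rational', 'coherent'},
--         {'knowledge', 'information', 'fact', 'data', 'learning'},
--         {'question', 'query', 'inquiry', 'ask', 'qa'},
--         {'answer', 'response', 'reply', 'solution', 'explanation'},
--     ]
--
--     for group in similarity_groups:
--         if term1 in group and term2 in group:
--             return True
--
--     return False
-- ===== SOURCE B (Python) =====
-- # B: flat word->group-ids table written out as a dict literal (no group list at call time);
-- # similarity = the two id sets are not disjoint, expressed as one boolean expression.
-- _WORD_GROUPS = {
--     'truth': [0], 'truthful': [0], 'honest': [0], 'accurate': [0],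
--     'fact': [0, 5], 'factual': [0],
--     'harm': [1], 'harmful': [1], 'toxic': [1], 'dangerous': [1], 'unsafe': [1], 'risk': [1],
--     'quality': [2], 'good': [2], 'excellent': [2], 'superior': [2], 'standard': [2],
--     'bias': [3], 'biased': [3], 'unfair': [3], 'prejudice': [3], 'discrimination': [3],
--     'logic': [4], 'logical': [4], 'reasoning': [4], 'rational': [4], 'coherent': [4],
--     'knowledge': [5], 'information': [5], 'data': [5], 'learning': [5],
--     'question': [6], 'query': [6], 'inquiry': [6], 'ask': [6], 'qa': [6],
--     'answer': [7], 'response': [7], 'reply': [7], 'solution': [7], 'explanation': [7],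
-- }
--
--
-- def _are_semantically_similar(term1: str, term2: str) -> bool:
--     return (term1 == term2
--             or term1 in term2
--             or term2 in term1
--             or not set(_WORD_GROUPS.get(term1, [])).isdisjoint(_WORD_GROUPS.get(term2, [])))
-- ===== Notes on version B (the rewrite author's own statement) =====
-- stated objective: alternative
-- what changed: A's eight set literals and per-call loop testing both terms' membership in each group are replaced by a flat precomputed word-to-group-ids dict ('fact' carrying both of its group ids) and a single boolean expression whose last disjunct tests non-disjointness of the two looked-up id sets.
import Mathlib
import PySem

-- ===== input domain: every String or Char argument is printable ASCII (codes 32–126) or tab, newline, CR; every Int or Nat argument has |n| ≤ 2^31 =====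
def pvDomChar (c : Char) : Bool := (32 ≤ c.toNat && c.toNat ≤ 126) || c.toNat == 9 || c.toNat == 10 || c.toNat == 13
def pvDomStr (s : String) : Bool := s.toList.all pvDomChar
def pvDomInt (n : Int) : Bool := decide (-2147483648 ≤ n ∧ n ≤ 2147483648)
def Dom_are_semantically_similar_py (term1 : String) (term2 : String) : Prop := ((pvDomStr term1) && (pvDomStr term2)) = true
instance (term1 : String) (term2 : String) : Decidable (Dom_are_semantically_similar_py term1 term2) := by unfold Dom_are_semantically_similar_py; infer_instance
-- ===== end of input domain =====

-- B replaces A's eight set literals and per-group loop by a flat precomputed word->group-ids dict and a single non-disjointness disjunct (alternative decomposition, same cost at this fixed table size).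

set_option maxRecDepth 16384


-- ===== PORT A =====
-- similarity_groups: Python set literals; only membership is consumed, so PySem.Set is exact.
def simGroups : List (PySem.Set String) :=
  [ PySem.Set.ofList ["truth", "truthful", "honest", "accurate", "fact", "factual"],
    PySem.Set.ofList ["harm", "harmful", "toxic", "dangerous", "unsafe", "risk"],
    PySem.Set.ofList ["quality", "good", "excellent", "superior", "standard"],
    PySem.Set.ofList ["bias", "biased", "unfair", "prejudice", "discrimination"],
    PySem.Set.ofList ["logic", "logical", "reasoning", "rational", "coherent"],
    PySem.Set.ofList ["knowledge", "information", "fact", "data", "learning"],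
    PySem.Set.ofList ["question", "query", "inquiry", "ask", "qa"],
    PySem.Set.ofList ["answer", "response", "reply", "solution", "explanation"] ]

-- the 'for group in similarity_groups' loop with early return = List.any
def are_semantically_similar_py (term1 : String) (term2 : String) : Bool :=
  if term1 == term2 then true
  else if PySem.Str.isIn term1 term2 || PySem.Str.isIn term2 term1 then true
  else simGroups.any (fun g => PySem.Set.contains g term1 && PySem.Set.contains g term2)

-- ===== PORT B =====
-- _WORD_GROUPS: a dict literal, word -> list of group ids
def wordGroups : PySem.Dict String (List Int) :=
  PySem.Dict.mk
    [ ("truth", [0]), ("truthful", [0]), ("honest", [0]), ("accurate", [0]),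
      ("fact", [0, 5]), ("factual", [0]),
      ("harm", [1]), ("harmful", [1]), ("toxic", [1]), ("dangerous", [1]), ("unsafe", [1]), ("risk", [1]),
      ("quality", [2]), ("good", [2]), ("excellent", [2]), ("superior", [2]), ("standard", [2]),
      ("bias", [3]), ("biased", [3]), ("unfair", [3]), ("prejudice", [3]), ("discrimination", [3]),
      ("logic", [4]), ("logical", [4]), ("reasoning", [4]), ("rational", [4]), ("coherent", [4]),
      ("knowledge", [5]), ("information", [5]), ("data", [5]), ("learning", [5]),
      ("question", [6]), ("query", [6]), ("inquiry", [6]), ("ask", [6]), ("qa", [6]),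
      ("answer", [7]), ("response", [7]), ("reply", [7]), ("solution", [7]), ("explanation", [7]) ]

-- one boolean expression: equality, two substring tests, non-disjointness of the looked-up id sets
def are_semantically_similar_py_alt (term1 : String) (term2 : String) : Bool :=
  term1 == term2
    || PySem.Str.isIn term1 term2
    || PySem.Str.isIn term2 term1
    || !(PySem.Set.isdisjoint (PySem.Set.ofList (wordGroups.getD term1 [])) (wordGroups.getD term2 []))

-- ===== PRECONDITION & SPEC =====
def Spec_are_semantically_similar_py (term1 : String) (term2 : String) (out : Bool) : Prop := out = are_semantically_similar_py_alt term1 term2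
instance (term1 : String) (term2 : String) (out : Bool) : Decidable (Spec_are_semantically_similar_py term1 term2 out) := by unfold Spec_are_semantically_similar_py; infer_instance

-- ===== CLAIM (what is proved, stated in full; the proofs are below) =====
def Claim_equal_are_semantically_similar_py : Prop := ∀ (term1 : String) (term2 : String), Dom_are_semantically_similar_py term1 term2 → Spec_are_semantically_similar_py term1 term2 (are_semantically_similar_py term1 term2)

-- ===== LEMMAS AND PROOFS =====

-- the lookup lists are exactly the ids of the groups containing the word
def idxOf (t : String) : List Int :=
  ([0, 1, 2, 3, 4, 5, 6, 7] : List Int).filter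
    (fun i => PySem.Set.contains (simGroups.getD i.toNat []) t)

def wordList : List String :=
  ["truth", "truthful", "honest", "accurate", "fact", "factual",
   "harm", "harmful", "toxic", "dangerous", "unsafe", "risk",
   "quality", "good", "excellent", "superior", "standard",
   "bias", "biased", "unfair", "prejudice", "discrimination",
   "logic", "logical", "reasoning", "rational", "coherent",
   "knowledge", "information", "data", "learning",
   "question", "query", "inquiry", "ask", "qa",
   "answer", "response", "reply", "solution", "explanation"]

lemma getD_of_not_mem (t : String) (h : t ∉ wordList) : wordGroups.getD t [] = [] := by
  simp only [wordList, List.mem_cons, not_or] at h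
  obtain ⟨h0, h1, h2, h3, h4, h5, h6, h7, h8, h9, h10, h11, h12, h13, h14, h15, h16, h17, h18,
    h19, h20, h21, h22, h23, h24, h25, h26, h27, h28, h29, h30, h31, h32, h33, h34, h35, h36,
    h37, h38, h39, h40, -⟩ := h
  have hnil : (PySem.Dict.mk ([] : List (String × List Int))).get? t = none := rfl
  simp [wordGroups, PySem.Dict.getD_eq_get?_getD, PySem.Dict.get?_mk_cons, hnil,
    beq_eq_false_iff_ne.mpr (Ne.symm h0), beq_eq_false_iff_ne.mpr (Ne.symm h1),
    beq_eq_false_iff_ne.mpr (Ne.symm h2), beq_eq_false_iff_ne.mpr (Ne.symm h3),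
    beq_eq_false_iff_ne.mpr (Ne.symm h4), beq_eq_false_iff_ne.mpr (Ne.symm h5),
    beq_eq_false_iff_ne.mpr (Ne.symm h6), beq_eq_false_iff_ne.mpr (Ne.symm h7),
    beq_eq_false_iff_ne.mpr (Ne.symm h8), beq_eq_false_iff_ne.mpr (Ne.symm h9),
    beq_eq_false_iff_ne.mpr (Ne.symm h10), beq_eq_false_iff_ne.mpr (Ne.symm h11),
    beq_eq_false_iff_ne.mpr (Ne.symm h12), beq_eq_false_iff_ne.mpr (Ne.symm h13),
    beq_eq_false_iff_ne.mpr (Ne.symm h14), beq_eq_false_iff_ne.mpr (Ne.symm h15),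
    beq_eq_false_iff_ne.mpr (Ne.symm h16), beq_eq_false_iff_ne.mpr (Ne.symm h17),
    beq_eq_false_iff_ne.mpr (Ne.symm h18), beq_eq_false_iff_ne.mpr (Ne.symm h19),
    beq_eq_false_iff_ne.mpr (Ne.symm h20), beq_eq_false_iff_ne.mpr (Ne.symm h21),
    beq_eq_false_iff_ne.mpr (Ne.symm h22), beq_eq_false_iff_ne.mpr (Ne.symm h23),
    beq_eq_false_iff_ne.mpr (Ne.symm h24), beq_eq_false_iff_ne.mpr (Ne.symm h25),
    beq_eq_false_iff_ne.mpr (Ne.symm h26), beq_eq_false_iff_ne.mpr (Ne.symm h27),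
    beq_eq_false_iff_ne.mpr (Ne.symm h28), beq_eq_false_iff_ne.mpr (Ne.symm h29),
    beq_eq_false_iff_ne.mpr (Ne.symm h30), beq_eq_false_iff_ne.mpr (Ne.symm h31),
    beq_eq_false_iff_ne.mpr (Ne.symm h32), beq_eq_false_iff_ne.mpr (Ne.symm h33),
    beq_eq_false_iff_ne.mpr (Ne.symm h34), beq_eq_false_iff_ne.mpr (Ne.symm h35),
    beq_eq_false_iff_ne.mpr (Ne.symm h36), beq_eq_false_iff_ne.mpr (Ne.symm h37),
    beq_eq_false_iff_ne.mpr (Ne.symm h38), beq_eq_false_iff_ne.mpr (Ne.symm h39),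
    beq_eq_false_iff_ne.mpr (Ne.symm h40)]

lemma idxOf_of_not_mem (t : String) (h : t ∉ wordList) : idxOf t = [] := by
  simp only [wordList, List.mem_cons, not_or] at h
  obtain ⟨h0, h1, h2, h3, h4, h5, h6, h7, h8, h9, h10, h11, h12, h13, h14, h15, h16, h17, h18,
    h19, h20, h21, h22, h23, h24, h25, h26, h27, h28, h29, h30, h31, h32, h33, h34, h35, h36,
    h37, h38, h39, h40, -⟩ := h
  simp [idxOf, simGroups, List.filter, PySem.Set.contains, PySem.Set.ofList,
    h0, h1, h2, h3, h4, h5, h6, h7, h8, h9, h10, h11,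
    h12, h13, h14, h15, h16, h17, h18, h19, h20, h21, h22, h23, h24, h25, h26, h27, h28, h29,
    h30, h31, h32, h33, h34, h35, h36, h37, h38, h39, h40]

lemma getD_eq_idxOf (t : String) : wordGroups.getD t [] = idxOf t := by
  by_cases h : t ∈ wordList
  · fin_cases h <;> decide
  · rw [getD_of_not_mem t h, idxOf_of_not_mem t h]

lemma not_disjoint_filter (L : List Int) (p1 p2 : Int → Bool) :
    (!(PySem.Set.isdisjoint (PySem.Set.ofList (L.filter p1)) (L.filter p2)))
      = L.any (fun i => p1 i && p2 i) := by
  rw [Bool.eq_iff_iff, Bool.not_eq_true', ← Bool.not_eq_true]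
  rw [Bool.not_eq_true (PySem.Set.isdisjoint _ _)]
  constructor
  · intro h
    rcases Bool.eq_false_iff.mp h with -
    have h' : ¬ (PySem.Set.isdisjoint (PySem.Set.ofList (L.filter p1)) (L.filter p2) = true) := by
      simp [h]
    rw [PySem.Set.isdisjoint_iff] at h'
    push Not at h'
    obtain ⟨i, hi1, hi2⟩ := h'
    rw [PySem.Set.mem_ofList, List.mem_filter] at hi1
    rw [List.mem_filter] at hi2
    simp only [List.any_eq_true, Bool.and_eq_true]
    exact ⟨i, hi1.1, hi1.2, hi2.2⟩
  · intro h
    simp only [List.any_eq_true, Bool.and_eq_true] at h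
    obtain ⟨i, hi, h1, h2⟩ := h
    apply Bool.eq_false_iff.mpr
    intro hd
    rw [PySem.Set.isdisjoint_iff] at hd
    exact hd i ((PySem.Set.mem_ofList _ _).mpr (List.mem_filter.mpr ⟨hi, h1⟩)) (List.mem_filter.mpr ⟨hi, h2⟩)

lemma intersection_eq (t1 t2 : String) :
    (!(PySem.Set.isdisjoint (PySem.Set.ofList (wordGroups.getD t1 [])) (wordGroups.getD t2 [])))
      = simGroups.any (fun g => PySem.Set.contains g t1 && PySem.Set.contains g t2) := by
  rw [getD_eq_idxOf, getD_eq_idxOf]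
  unfold idxOf
  rw [not_disjoint_filter]
  rfl

lemma if_chain_eq_or (a b c d : Bool) :
    (if a = true then true else if (b || c) = true then true else d) = (a || b || c || d) := by
  cases a <;> cases b <;> cases c <;> cases d <;> decide

-- ===== VERDICT (by name: the statement is the Claim_ definition above) =====
theorem are_semantically_similar_py_spec : Claim_equal_are_semantically_similar_py := by
  intro t1 t2 _
  unfold Spec_are_semantically_similar_py are_semantically_similar_py are_semantically_similar_py_alt
  rw [intersection_eq]
  exact if_chain_eq_or (t1 == t2) (PySem.Str.isIn t1 t2) (PySem.Str.isIn t2 t1)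
    (simGroups.any fun g => PySem.Set.contains g t1 && PySem.Set.contains g t2)
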